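-- pv_equiv track=rewrite | github.com/yuters777/stock-data-mining | backtest_output/ant6/module8_data_prep.py | compute_d0
-- ===== SOURCE A (Python) =====
-- def next_trading_day(trading_days, d, offset=1):
--     """Get the trading day offset days after d."""
--     if d not in trading_days:
--         # Find nearest following trading day
--         for td in trading_days:
--             if td > d:
--                 d = td
--                 break
--         else:
--             return None
--         offset -= 1
--     idx = trading_days.index(d)
--     target = idx + offset
--     if 0 <= target < len(trading_days):
--         return trading_days[target]
--     return None
--
-- def compute_d0(earnings_date_str, time_of_day, trading_days):
--     """
--     AMC on date d → D0 = next trading day.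
--     BMO on date d → D0 = same trading day (if it's a trading day, else next).
--     """
--     if time_of_day == "AMC":
--         return next_trading_day(trading_days, earnings_date_str, offset=1)
--     elif time_of_day == "BMO":
--         if earnings_date_str in trading_days:
--             return earnings_date_str
--         # If earnings_date is not a trading day, find next
--         for td in trading_days:
--             if td >= earnings_date_str:
--                 return td
--         return None
--     return None  # UNKNOWN
-- ===== SOURCE B (Python) =====
-- def compute_d0(earnings_date_str, time_of_day, trading_days):
--     """
--     AMC on date d -> D0 = next trading day.
--     BMO on date d -> D0 = same trading day (if it's a trading day, else next).
--     Single left-to-right pass; no membership test, no .index, no helper.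
--     """
--     if time_of_day == "AMC":
--         first_gt = None      # first day strictly after the earnings date, in list order
--         prev_was_date = False
--         for td in trading_days:
--             if prev_was_date:
--                 return td
--             if first_gt is None and td > earnings_date_str:
--                 first_gt = td
--             if td == earnings_date_str:
--                 prev_was_date = True
--         return None if prev_was_date else first_gt
--     elif time_of_day == "BMO":
--         first_ge = None      # first day >= the earnings date, in list order
--         for td in trading_days:
--             if td == earnings_date_str:
--                 return td
--             if first_ge is None and td >= earnings_date_str:
--                 first_ge = td
--         return first_ge
--     return None
-- ===== Notes on version B (the rewrite author's own statement) =====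
-- stated objective: alternative
-- what changed: Replaces A's membership test + .index + extra scans (up to four passes over the list via the next_trading_day helper) with a single left-to-right pass per mode that tracks the first strictly-greater / greater-or-equal day and whether the previous element was the earnings date.
import Mathlib
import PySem

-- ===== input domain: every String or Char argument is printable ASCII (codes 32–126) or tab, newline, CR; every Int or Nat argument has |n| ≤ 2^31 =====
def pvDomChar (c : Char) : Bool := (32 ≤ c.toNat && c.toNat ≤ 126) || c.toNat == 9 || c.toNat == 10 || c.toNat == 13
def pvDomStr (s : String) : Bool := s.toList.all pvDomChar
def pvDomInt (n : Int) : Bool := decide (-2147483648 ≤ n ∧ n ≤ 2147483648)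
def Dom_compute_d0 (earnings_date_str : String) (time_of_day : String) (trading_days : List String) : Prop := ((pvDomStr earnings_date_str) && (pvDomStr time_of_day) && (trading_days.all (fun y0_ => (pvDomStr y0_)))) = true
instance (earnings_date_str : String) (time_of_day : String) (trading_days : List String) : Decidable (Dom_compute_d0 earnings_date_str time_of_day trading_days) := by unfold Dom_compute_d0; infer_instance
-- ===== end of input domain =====

-- B replaces A's membership test + .index + extra scans with one left-to-right pass per mode
-- (objective: alternative — same O(n) cost, a single pass instead of up to four).

-- ===== PORT A =====
-- A's helper next_trading_day: membership test, scan for the first strictly later day,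
-- then .index and subscript.  Python's .index cannot fail here (d' is in the list), so the
-- none branch of index? is unreachable; it is kept as none for totality.
def next_trading_day (trading_days : List String) (d : String) (offset : Int) : Option String :=
  let step : String × Int × Bool :=
    if d ∈ trading_days then (d, offset, true)
    else
      match trading_days.find? (fun td => decide (d < td)) with
      | some td => (td, offset - 1, true)
      | none => (d, offset, false)
  match step with
  | (d', offset', ok) =>
    if ok then
      match PySem.List.index? trading_days d' with
      | some idx =>
        let target : Int := (idx : Int) + offset'
        if 0 ≤ target ∧ target < trading_days.length then
          PySem.List.pyGet? trading_days target
        else none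
      | none => none
    else none

def compute_d0 (earnings_date_str : String) (time_of_day : String) (trading_days : List String) : Option String :=
  if time_of_day = "AMC" then
    next_trading_day trading_days earnings_date_str 1
  else if time_of_day = "BMO" then
    if earnings_date_str ∈ trading_days then some earnings_date_str
    else trading_days.find? (fun td => decide (earnings_date_str ≤ td))
  else none

-- ===== PORT B =====
-- single pass for AMC: remember the first strictly later day and whether the previous
-- element was the earnings date
def pvAmcLoop (e : String) : List String → Option String → Bool → Option String
  | [], firstGt, prev => if prev then none else firstGt
  | td :: rest, firstGt, prev =>
    if prev then some td
    else
      let firstGt' := if firstGt.isNone ∧ e < td then some td else firstGt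
      if td = e then pvAmcLoop e rest firstGt' true else pvAmcLoop e rest firstGt' false

-- single pass for BMO: return the date itself on a hit, else the first day ≥ it
def pvBmoLoop (e : String) : List String → Option String → Option String
  | [], firstGe => firstGe
  | td :: rest, firstGe =>
    if td = e then some td
    else pvBmoLoop e rest (if firstGe.isNone ∧ e ≤ td then some td else firstGe)

def compute_d0_alt (earnings_date_str : String) (time_of_day : String) (trading_days : List String) : Option String :=
  if time_of_day = "AMC" then
    pvAmcLoop earnings_date_str trading_days none false
  else if time_of_day = "BMO" then
    pvBmoLoop earnings_date_str trading_days none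
  else none

-- ===== PRECONDITION & SPEC =====
def Spec_compute_d0 (earnings_date_str : String) (time_of_day : String) (trading_days : List String) (out : Option String) : Prop := out = compute_d0_alt earnings_date_str time_of_day trading_days
instance (earnings_date_str : String) (time_of_day : String) (trading_days : List String) (out : Option String) : Decidable (Spec_compute_d0 earnings_date_str time_of_day trading_days out) := by unfold Spec_compute_d0; infer_instance

-- ===== CLAIM (what is proved, stated in full; the proofs are below) =====
def Claim_equal_compute_d0 : Prop := ∀ (earnings_date_str : String) (time_of_day : String) (trading_days : List String), Dom_compute_d0 earnings_date_str time_of_day trading_days → Spec_compute_d0 earnings_date_str time_of_day trading_days (compute_d0 earnings_date_str time_of_day trading_days)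

-- ===== LEMMAS AND PROOFS =====

-- once the earnings date has just been seen, B returns the head of the remainder
theorem pvAmcLoop_true (e : String) (l : List String) (acc : Option String) :
    pvAmcLoop e l acc true = l.head? := by
  cases l <;> simp [pvAmcLoop]

-- B on AMC, date present: the element after the first occurrence
theorem pvAmcLoop_mem (e : String) (l : List String) (acc : Option String) (k : Nat)
    (h : PySem.List.index? l e = some k) :
    pvAmcLoop e l acc false = l[k + 1]? := by
  induction l generalizing acc k with
  | nil => simp [PySem.List.index?] at h
  | cons td rest ih =>
    by_cases hte : td = e
    · subst hte
      rw [PySem.List.index?_cons_self] at h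
      obtain rfl : 0 = k := Option.some.inj h
      simp [pvAmcLoop, pvAmcLoop_true, List.head?_eq_getElem?]
    · rw [PySem.List.index?_cons_of_ne rest hte] at h
      cases hr : PySem.List.index? rest e with
      | none => rw [hr] at h; simp at h
      | some k' =>
        rw [hr] at h
        simp only [Option.map_some] at h
        obtain rfl : k' + 1 = k := Option.some.inj h
        simp only [pvAmcLoop, if_neg hte, if_neg (Bool.false_ne_true)]
        rw [ih _ _ hr]
        simp

-- B on AMC, date absent: the stored candidate, else the first strictly later day
theorem pvAmcLoop_not_mem (e : String) (l : List String) (acc : Option String)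
    (h : e ∉ l) :
    pvAmcLoop e l acc false = acc.or (l.find? (fun td => decide (e < td))) := by
  induction l generalizing acc with
  | nil => simp [pvAmcLoop]
  | cons td rest ih =>
    have hte : td ≠ e := fun hh => h (hh ▸ List.mem_cons_self)
    have hrest : e ∉ rest := fun hh => h (List.mem_cons_of_mem _ hh)
    simp only [pvAmcLoop, if_neg hte, if_neg (Bool.false_ne_true)]
    rw [ih _ hrest]
    cases acc with
    | some x => simp [List.find?_cons]
    | none =>
      rw [List.find?_cons]
      by_cases hlt : e < td
      · rw [if_pos ⟨rfl, hlt⟩, decide_eq_true hlt]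
        rfl
      · rw [if_neg (fun hh => hlt hh.2), decide_eq_false hlt]

-- B on BMO, date present
theorem pvBmoLoop_mem (e : String) (l : List String) (acc : Option String)
    (h : e ∈ l) :
    pvBmoLoop e l acc = some e := by
  induction l generalizing acc with
  | nil => cases h
  | cons td rest ih =>
    by_cases hte : td = e
    · simp [pvBmoLoop, hte]
    · have hrest : e ∈ rest := by
        cases h with
        | head => exact absurd rfl hte
        | tail _ hh => exact hh
      simp [pvBmoLoop, hte, ih _ hrest]

-- B on BMO, date absent: the stored candidate, else the first day ≥ the date
theorem pvBmoLoop_not_mem (e : String) (l : List String) (acc : Option String)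
    (h : e ∉ l) :
    pvBmoLoop e l acc = acc.or (l.find? (fun td => decide (e ≤ td))) := by
  induction l generalizing acc with
  | nil => simp [pvBmoLoop]
  | cons td rest ih =>
    have hte : td ≠ e := fun hh => h (hh ▸ List.mem_cons_self)
    have hrest : e ∉ rest := fun hh => h (List.mem_cons_of_mem _ hh)
    simp only [pvBmoLoop, if_neg hte]
    rw [ih _ hrest]
    cases acc with
    | some x => simp [List.find?_cons]
    | none =>
      rw [List.find?_cons]
      by_cases hle : e ≤ td
      · rw [if_pos ⟨rfl, hle⟩, decide_eq_true hle]
        rfl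
      · rw [if_neg (fun hh => hle hh.2), decide_eq_false hle]

-- A's helper, date present: the element after the first occurrence
theorem next_trading_day_mem (l : List String) (e : String) (k : Nat)
    (hmem : e ∈ l) (h : PySem.List.index? l e = some k) :
    next_trading_day l e 1 = l[k + 1]? := by
  unfold next_trading_day
  simp only [if_pos hmem, h]
  obtain ⟨hk, -, -⟩ := PySem.List.getElem_of_index?_eq_some h
  have harith : ((k : Int) + 1) = ((k + 1 : Nat) : Int) := by push_cast; ring
  rw [harith, PySem.List.pyGet?_natCast]
  by_cases hlt : k + 1 < l.length
  · have hc : (0:Int) ≤ ((k + 1 : Nat) : Int) ∧ ((k + 1 : Nat) : Int) < (l.length : Int) := by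
      push_cast; omega
    rw [if_pos hc]
    simp
  · have hc : ¬ ((0:Int) ≤ ((k + 1 : Nat) : Int) ∧ ((k + 1 : Nat) : Int) < (l.length : Int)) := by
      push_cast; omega
    rw [if_neg hc, List.getElem?_eq_none (by omega)]
    simp

-- A's helper, date absent: the first strictly later day
theorem next_trading_day_not_mem (l : List String) (e : String) (hmem : e ∉ l) :
    next_trading_day l e 1 = l.find? (fun td => decide (e < td)) := by
  unfold next_trading_day
  simp only [if_neg hmem]
  cases hf : l.find? (fun td => decide (e < td)) with
  | none => simp
  | some td =>
    have htd : td ∈ l := List.mem_of_find?_eq_some hf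
    have hidx : (PySem.List.index? l td).isSome := (PySem.List.index?_isSome_iff l td).mpr htd
    obtain ⟨k, hk⟩ := Option.isSome_iff_exists.mp hidx
    obtain ⟨hklen, hval, _⟩ := PySem.List.getElem_of_index?_eq_some hk
    simp only [hk]
    have harith : ((k : Int) + (1 - 1)) = ((k : Nat) : Int) := by push_cast; ring
    have hc : (0:Int) ≤ ((k : Nat) : Int) ∧ ((k : Nat) : Int) < (l.length : Int) := by
      omega
    rw [harith, PySem.List.pyGet?_natCast, if_pos hc, List.getElem?_eq_getElem hklen, hval]
    simp

-- ===== VERDICT (by name: the statement is the Claim_ definition above) =====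
theorem compute_d0_spec : Claim_equal_compute_d0 := by
  intro e t l _
  unfold Spec_compute_d0 compute_d0 compute_d0_alt
  by_cases ht : t = "AMC"
  · simp only [if_pos ht]
    by_cases hmem : e ∈ l
    · obtain ⟨k, hk⟩ := Option.isSome_iff_exists.mp ((PySem.List.index?_isSome_iff l e).mpr hmem)
      rw [next_trading_day_mem l e k hmem hk, pvAmcLoop_mem e l none k hk]
    · rw [next_trading_day_not_mem l e hmem, pvAmcLoop_not_mem e l none hmem]
      simp
  · simp only [if_neg ht]
    by_cases ht2 : t = "BMO"
    · simp only [if_pos ht2]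
      by_cases hmem : e ∈ l
      · rw [pvBmoLoop_mem e l none hmem, if_pos hmem]
      · rw [pvBmoLoop_not_mem e l none hmem, if_neg hmem]
        simp
    · simp [if_neg ht2]
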